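-- pv_equiv track=rewrite | github.com/tjvick/advent-of-code | 2024_python/solutions/day09/part2.py | get_spans_of_disk_space
-- ===== SOURCE A (Python) =====
-- def get_spans_of_disk_space(disk_map):
--     spans_of_disk_space = []
--
--     cumulative_sum = 0
--     for size in disk_map:
--         span = (cumulative_sum, cumulative_sum + size)
--         spans_of_disk_space.append(span)
--         cumulative_sum += size
--
--     return spans_of_disk_space
-- ===== SOURCE B (Python) =====
-- def get_spans_of_disk_space(disk_map):
--     def go(seg):
--         # returns (spans of seg counted from offset 0, total size of seg)
--         n = len(seg)
--         if n == 0: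
--             return [], 0
--         if n == 1:
--             return [(0, seg[0])], seg[0]
--         mid = n // 2
--         left, left_total = go(seg[:mid])
--         right, right_total = go(seg[mid:])
--         shifted = [(s + left_total, e + left_total) for (s, e) in right]
--         return left + shifted, left_total + right_total
--
--     spans, _total = go(disk_map)
--     return spans
-- ===== Notes on version B (the rewrite author's own statement) =====
-- stated objective: alternative
-- what changed: Replaces the single left-to-right loop carrying a running cumulative sum with a divide-and-conquer: each half's spans are computed independently starting from offset 0, and the right half's spans are shifted by the left half's total; correctness rests on spans being translation-equivariant.
import Mathlib
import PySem

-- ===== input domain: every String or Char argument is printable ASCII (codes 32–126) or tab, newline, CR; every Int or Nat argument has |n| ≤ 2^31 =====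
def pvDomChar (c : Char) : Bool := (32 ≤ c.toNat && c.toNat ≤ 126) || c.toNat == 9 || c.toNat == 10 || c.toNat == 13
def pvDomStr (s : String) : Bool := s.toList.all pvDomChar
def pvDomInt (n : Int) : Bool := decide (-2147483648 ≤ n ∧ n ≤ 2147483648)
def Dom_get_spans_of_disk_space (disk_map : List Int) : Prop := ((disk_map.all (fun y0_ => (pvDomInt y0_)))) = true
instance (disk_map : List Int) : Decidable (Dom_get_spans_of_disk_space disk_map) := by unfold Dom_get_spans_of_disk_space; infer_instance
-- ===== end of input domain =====

-- B replaces A's left-to-right loop with a running cumulative sum by a divide-and-conquer: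
-- spans of each half are computed independently from offset 0 and the right half is shifted
-- by the left half's total (alternative decomposition, not faster; same result).

-- ===== PORT A =====
def get_spans_of_disk_space (disk_map : List Int) : List (Int × Int) :=
  (disk_map.foldl
    (fun (st : List (Int × Int) × Int) size =>
      (st.1 ++ [(st.2, st.2 + size)], st.2 + size))
    ([], 0)).1

-- ===== PORT B =====
-- go(seg): (spans of seg counted from offset 0, total of seg); seg[:mid]/seg[mid:] with
-- 0 ≤ mid ≤ len(seg) are exactly List.take mid / List.drop mid.
def pvGo : List Int → List (Int × Int) × Int
  | [] => ([], 0)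
  | [x] => ([(0, x)], x)
  | x :: y :: rest =>
    let mid := (x :: y :: rest).length / 2
    let L := pvGo ((x :: y :: rest).take mid)
    let R := pvGo ((x :: y :: rest).drop mid)
    (L.1 ++ R.1.map (fun p => (p.1 + L.2, p.2 + L.2)), L.2 + R.2)
termination_by l => l.length
decreasing_by
  · simp [List.length_take]; omega
  · simp [List.length_drop]; omega

def get_spans_of_disk_space_alt (disk_map : List Int) : List (Int × Int) :=
  (pvGo disk_map).1

-- ===== PRECONDITION & SPEC =====
def Spec_get_spans_of_disk_space (disk_map : List Int) (out : List (Int × Int)) : Prop := out = get_spans_of_disk_space_alt disk_map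
instance (disk_map : List Int) (out : List (Int × Int)) : Decidable (Spec_get_spans_of_disk_space disk_map out) := by unfold Spec_get_spans_of_disk_space; infer_instance

-- ===== CLAIM (what is proved, stated in full; the proofs are below) =====
def Claim_equal_get_spans_of_disk_space : Prop := ∀ (disk_map : List Int), Dom_get_spans_of_disk_space disk_map → Spec_get_spans_of_disk_space disk_map (get_spans_of_disk_space disk_map)

-- ===== LEMMAS AND PROOFS =====

-- reference spec: spans of l starting at offset c
def pvSpans (c : Int) : List Int → List (Int × Int)
  | [] => []
  | x :: xs => (c, c + x) :: pvSpans (c + x) xs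

lemma pvSpans_add (l : List Int) (c d : Int) :
    pvSpans (c + d) l = (pvSpans d l).map (fun p => (p.1 + c, p.2 + c)) := by
  induction l generalizing d with
  | nil => simp [pvSpans]
  | cons x xs ih =>
      simp only [pvSpans, List.map_cons]
      congr 1
      · simp only [Prod.mk.injEq]; constructor <;> ring
      · rw [add_assoc, ih (d + x)]

lemma pvSpans_append (l₁ l₂ : List Int) (c : Int) :
    pvSpans c (l₁ ++ l₂) = pvSpans c l₁ ++ pvSpans (c + l₁.sum) l₂ := by
  induction l₁ generalizing c with
  | nil => simp [pvSpans]
  | cons x xs ih => simp [pvSpans, ih, add_assoc]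

lemma pvGo_eq (l : List Int) : pvGo l = (pvSpans 0 l, l.sum) := by
  induction l using pvGo.induct with
  | case1 => simp [pvGo, pvSpans]
  | case2 x => simp [pvGo, pvSpans]
  | case3 x y rest mid ih1 ih2 =>
      simp only [pvGo]
      rw [ih1, ih2]
      simp only [Prod.mk.injEq]
      have hsplit : (x :: y :: rest).take ((x :: y :: rest).length / 2) ++
          (x :: y :: rest).drop ((x :: y :: rest).length / 2) = x :: y :: rest :=
        List.take_append_drop _ _
      constructor
      · have := pvSpans_append ((x :: y :: rest).take ((x :: y :: rest).length / 2))
          ((x :: y :: rest).drop ((x :: y :: rest).length / 2)) 0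
        rw [hsplit] at this
        rw [this, ← pvSpans_add]
        simp only [add_zero, zero_add]
        rfl
      · have := congrArg List.sum hsplit
        rw [List.sum_append] at this
        exact this

lemma foldl_spans_eq (l : List Int) (acc : List (Int × Int)) (c : Int) :
    (l.foldl
      (fun (st : List (Int × Int) × Int) size =>
        (st.1 ++ [(st.2, st.2 + size)], st.2 + size))
      (acc, c)).1 = acc ++ pvSpans c l := by
  induction l generalizing acc c with
  | nil => simp [pvSpans]
  | cons x xs ih => simp [pvSpans, ih]

-- ===== VERDICT (by name: the statement is the Claim_ definition above) =====
theorem get_spans_of_disk_space_spec : Claim_equal_get_spans_of_disk_space := by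
  intro l _
  show _ = _
  rw [get_spans_of_disk_space, get_spans_of_disk_space_alt, foldl_spans_eq, pvGo_eq]
  simp
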